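-- pv_equiv track=rewrite | github.com/darknessest/DataMining | lab3/efficient_apriori/itemsets.py | candidate_itemset_counts
-- ===== SOURCE A (Python) =====
-- def candidate_itemset_counts(
--     C_k, C_k_sets, counter, counts, row, transaction
-- ):
--     # Assert that no items were found in this row
--     found_any = False
--     issubset = set.issubset  # Micro-optimization
--     for candidate, candidate_set in zip(C_k, C_k_sets):
--         # This is where most of the time is spent in the algorithm
--         # If the candidate set is a subset, add count and mark the row
--         if issubset(candidate_set, transaction):
--             counts[candidate] += 1
--             found_any = True
--     return counts, found_any
-- ===== SOURCE B (Python) =====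
-- def candidate_itemset_counts(
--     C_k, C_k_sets, counter, counts, row, transaction
-- ):
--     # Inverted index: map each item to the candidates that need it, then let
--     # the transaction's items drive per-candidate matched-item counters; a
--     # candidate is a subset exactly when all of its distinct items matched.
--     # (Like A, this mutates `counts` in place.)
--     pairs = list(zip(C_k, C_k_sets))
--     index = {}
--     for i, (_, cs) in enumerate(pairs):
--         for x in set(cs):
--             index.setdefault(x, []).append(i)
--     have = {}
--     for t in set(transaction):
--         for i in index.get(t, ()):
--             have[i] = have.get(i, 0) + 1
--     found_any = False
--     for i, (candidate, cs) in enumerate(pairs):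
--         if have.get(i, 0) == len(set(cs)):
--             counts[candidate] += 1
--             found_any = True
--     return counts, found_any
-- ===== Notes on version B (the rewrite author's own statement) =====
-- stated objective: alternative
-- what changed: A tests every candidate set for subset-of-transaction; B never performs a subset test: it builds an inverted index item -> candidate positions, lets the transaction's distinct items drive per-candidate matched-item counters, and declares a candidate a hit when its matched count equals its distinct size.
-- outside the precondition, e.g. on candidate_itemset_counts([(1,), (2,)], [{1}, {2}], 0, {(1,): 0}, 0, {1, 2}): A raises KeyError, B raises KeyError
import Mathlib
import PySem

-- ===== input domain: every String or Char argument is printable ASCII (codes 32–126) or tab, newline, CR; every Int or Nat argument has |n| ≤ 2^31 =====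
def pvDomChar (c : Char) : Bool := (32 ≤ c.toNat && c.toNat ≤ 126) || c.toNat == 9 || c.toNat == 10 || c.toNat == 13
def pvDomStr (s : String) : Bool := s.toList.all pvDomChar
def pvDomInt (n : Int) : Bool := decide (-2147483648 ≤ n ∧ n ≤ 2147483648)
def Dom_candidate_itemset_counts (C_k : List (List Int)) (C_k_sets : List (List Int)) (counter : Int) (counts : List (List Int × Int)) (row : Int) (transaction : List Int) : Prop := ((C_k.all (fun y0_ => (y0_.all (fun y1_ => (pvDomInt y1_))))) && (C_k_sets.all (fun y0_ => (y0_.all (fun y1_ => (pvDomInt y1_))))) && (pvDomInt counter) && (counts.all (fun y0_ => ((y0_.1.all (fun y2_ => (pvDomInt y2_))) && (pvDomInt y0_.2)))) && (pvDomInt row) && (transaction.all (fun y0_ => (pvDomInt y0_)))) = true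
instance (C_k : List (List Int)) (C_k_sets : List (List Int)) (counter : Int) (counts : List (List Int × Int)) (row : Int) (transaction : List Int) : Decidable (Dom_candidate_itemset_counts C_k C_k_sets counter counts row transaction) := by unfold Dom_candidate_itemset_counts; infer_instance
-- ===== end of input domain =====

-- ===== PORT A =====
-- B replaces A's per-candidate subset tests by an inverted index (item ->
-- candidate positions) driven by the transaction's items (objective: alternative).
-- Both A and B mutate `counts` in place in Python; the mutation is the returned dict.
-- `counts[candidate] += 1` is ported as Dict.modify with default 0: exact whenever the
-- candidate is a key of counts (Pre_); on a missing key Python raises KeyError.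
def candidate_itemset_counts (C_k : List (List Int)) (C_k_sets : List (List Int)) (counter : Int) (counts : List (List Int × Int)) (row : Int) (transaction : List Int) : (List (List Int × Int)) × Bool :=
  let st := (C_k.zip C_k_sets).foldl
    (fun st p =>
      if PySem.Set.issubset p.2 transaction then (st.1.modify p.1 0 (· + 1), true) else st)
    (PySem.Dict.mk counts, false)
  (st.1.items, st.2)

-- ===== PORT B =====
-- B-side helpers: the first two loops of Source B.
-- Source B's `for i, (_, cs) in enumerate(pairs): for x in set(cs): index.setdefault(x, []).append(i)`
def pvIndexB (pairs : List (List Int × List Int)) : PySem.Dict Int (List Int) :=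
  (PySem.List.enumerate pairs).foldl
    (fun d ip => (PySem.Set.ofList ip.2.2).foldl (fun d x => d.modify x [] (· ++ [ip.1])) d)
    PySem.Dict.empty

-- Source B's `for t in set(transaction): for i in index.get(t, ()): have[i] = have.get(i, 0) + 1`
def pvHaveB (index : PySem.Dict Int (List Int)) (transaction : List Int) : PySem.Dict Int Int :=
  (PySem.Set.ofList transaction).foldl
    (fun h t => (index.getD t []).foldl (fun h i => h.modify i 0 (· + 1)) h)
    PySem.Dict.empty

-- `counts[candidate] += 1` is likewise Dict.modify with default 0 (exact under Pre_;
-- Python raises KeyError on a missing key, as A does). The iterations over set(cs)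
-- and set(transaction) only feed order-insensitive results (a dict looked up later,
-- commuting counter increments), so PySem.Set.ofList's order is exact here.
def candidate_itemset_counts_alt (C_k : List (List Int)) (C_k_sets : List (List Int)) (counter : Int) (counts : List (List Int × Int)) (row : Int) (transaction : List Int) : (List (List Int × Int)) × Bool :=
  let st := (PySem.List.enumerate (C_k.zip C_k_sets)).foldl
    (fun st ip =>
      if (pvHaveB (pvIndexB (C_k.zip C_k_sets)) transaction).getD ip.1 0
           == ((PySem.Set.ofList ip.2.2).length : Int)
      then (st.1.modify ip.2.1 0 (· + 1), true) else st)
    (PySem.Dict.mk counts, false)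
  (st.1.items, st.2)

-- ===== PRECONDITION & SPEC =====
-- Pre_ excludes exactly the inputs on which Python A raises KeyError: some zipped
-- candidate whose set is a subset of the transaction is not a key of counts.
def Pre_candidate_itemset_counts (C_k : List (List Int)) (C_k_sets : List (List Int)) (counter : Int) (counts : List (List Int × Int)) (row : Int) (transaction : List Int) : Prop :=
  ∀ p ∈ C_k.zip C_k_sets,
    PySem.Set.issubset p.2 transaction = true → (PySem.Dict.mk counts).contains p.1 = true
instance (C_k : List (List Int)) (C_k_sets : List (List Int)) (counter : Int) (counts : List (List Int × Int)) (row : Int) (transaction : List Int) : Decidable (Pre_candidate_itemset_counts C_k C_k_sets counter counts row transaction) := by unfold Pre_candidate_itemset_counts; infer_instance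

def pvWitness_candidate_itemset_counts : List (List Int) × List (List Int) × Int × (List (List Int × Int)) × Int × List Int :=
  ([[1], [2, 3]], [[1], [2]], 0, [([1], 2), ([2, 3], 0)], 7, [1, 2])
def Spec_candidate_itemset_counts (C_k : List (List Int)) (C_k_sets : List (List Int)) (counter : Int) (counts : List (List Int × Int)) (row : Int) (transaction : List Int) (out : (List (List Int × Int)) × Bool) : Prop := out = candidate_itemset_counts_alt C_k C_k_sets counter counts row transaction
instance (C_k : List (List Int)) (C_k_sets : List (List Int)) (counter : Int) (counts : List (List Int × Int)) (row : Int) (transaction : List Int) (out : (List (List Int × Int)) × Bool) : Decidable (Spec_candidate_itemset_counts C_k C_k_sets counter counts row transaction out) := by unfold Spec_candidate_itemset_counts; infer_instance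

-- ===== CLAIM (what is proved, stated in full; the proofs are below) =====
def Claim_equal_candidate_itemset_counts : Prop := ∀ (C_k : List (List Int)) (C_k_sets : List (List Int)) (counter : Int) (counts : List (List Int × Int)) (row : Int) (transaction : List Int), Dom_candidate_itemset_counts C_k C_k_sets counter counts row transaction → Pre_candidate_itemset_counts C_k C_k_sets counter counts row transaction → Spec_candidate_itemset_counts C_k C_k_sets counter counts row transaction (candidate_itemset_counts C_k C_k_sets counter counts row transaction)

-- ===== LEMMAS AND PROOFS =====

theorem pv_witness_ok :
    Dom_candidate_itemset_counts (pvWitness_candidate_itemset_counts.1) (pvWitness_candidate_itemset_counts.2.1) (pvWitness_candidate_itemset_counts.2.2.1) (pvWitness_candidate_itemset_counts.2.2.2.1) (pvWitness_candidate_itemset_counts.2.2.2.2.1) (pvWitness_candidate_itemset_counts.2.2.2.2.2) ∧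
    Pre_candidate_itemset_counts (pvWitness_candidate_itemset_counts.1) (pvWitness_candidate_itemset_counts.2.1) (pvWitness_candidate_itemset_counts.2.2.1) (pvWitness_candidate_itemset_counts.2.2.2.1) (pvWitness_candidate_itemset_counts.2.2.2.2.1) (pvWitness_candidate_itemset_counts.2.2.2.2.2) := by
  decide

-- the inner index-building loop: d[t] gains one copy of i per occurrence of t in xs
theorem pv_inner_fold (i t : Int) (xs : List Int) (d : PySem.Dict Int (List Int)) :
    (xs.foldl (fun d x => d.modify x [] (· ++ [i])) d).getD t []
      = d.getD t [] ++ ((xs.filter (fun x => x == t)).map (fun _ => i)) := by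
  have h : xs.foldl (fun d x => d.modify x [] (· ++ [i])) d
      = (xs.map (fun x => (x, i))).foldl (fun d p => d.modify p.1 [] (· ++ [p.2])) d := by
    rw [List.foldl_map]
  rw [h, PySem.Dict.getD_foldl_modify_append, List.filter_map, List.map_map]
  simp [Function.comp_def]

-- in a Nodup list, filtering for equality with t keeps at most the one element t
theorem pv_filter_nodup (t : Int) (xs : List Int) (h : xs.Nodup) :
    xs.filter (fun x => x == t) = if t ∈ xs then [t] else [] := by
  induction xs with
  | nil => simp
  | cons x xs ih =>
      rcases List.nodup_cons.mp h with ⟨hx, hnd⟩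
      by_cases hxt : x = t
      · subst hxt
        have hnil : xs.filter (fun y => y == x) = [] :=
          List.filter_eq_nil_iff.mpr (fun y hy => by
            simp only [beq_iff_eq]
            intro hyx; exact hx (hyx ▸ hy))
        simp [hnil]
      · have ht : t ∈ x :: xs ↔ t ∈ xs := by
          constructor
          · intro hmem
            rcases List.mem_cons.mp hmem with hmem | hmem
            · exact absurd hmem.symm hxt
            · exact hmem
          · exact List.mem_cons_of_mem x
        rw [List.filter_cons, if_neg (by simp [hxt]), ih hnd]
        simp [ht]

-- index characterisation: index[t] is the list of enumerate positions whose
-- candidate set contains t, in position order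
theorem pv_index_char (t : Int) (l : List (Int × (List Int × List Int))) :
    ∀ d : PySem.Dict Int (List Int),
    (l.foldl (fun d ip => (PySem.Set.ofList ip.2.2).foldl
        (fun d x => d.modify x [] (· ++ [ip.1])) d) d).getD t []
      = d.getD t [] ++ (l.filter (fun ip => decide (t ∈ ip.2.2))).map (fun ip => ip.1) := by
  induction l with
  | nil => intro d; simp
  | cons ip l ih =>
      intro d
      rw [List.foldl_cons, ih, pv_inner_fold, pv_filter_nodup t _ (PySem.Set.nodup_ofList _)]
      by_cases hm : t ∈ ip.2.2
      · simp [List.filter_cons, hm, PySem.Set.mem_ofList, List.append_assoc]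
      · simp [List.filter_cons, hm, PySem.Set.mem_ofList]

-- the counting loop: after all increments, have[i] is the sum of i's occurrences
theorem pv_have_fold (g : Int → List Int) (ts : List Int) (i : Int) :
    ∀ h : PySem.Dict Int Int,
    (ts.foldl (fun h t => (g t).foldl (fun h i => h.modify i 0 (· + 1)) h) h).getD i 0
      = h.getD i 0 + ((ts.map (fun t => (List.count i (g t) : Int))).sum) := by
  induction ts with
  | nil => intro h; simp
  | cons t ts ih =>
      intro h
      rw [List.foldl_cons, ih, PySem.Dict.getD_foldl_modify_add_one]
      simp [add_assoc]

-- each enumerate position occurs at most once among the kept positions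
theorem pv_count_filter_map (pairs : List (List Int × List Int)) (i : Int)
    (p : List Int × List Int) (hmem : (i, p) ∈ PySem.List.enumerate pairs) (t : Int) :
    List.count i (((PySem.List.enumerate pairs).filter
        (fun ip => decide (t ∈ ip.2.2))).map (fun ip => ip.1))
      = if t ∈ p.2 then 1 else 0 := by
  by_cases hm : t ∈ p.2
  · rw [if_pos hm]
    apply List.count_eq_one_of_mem
    · have hfl : ((PySem.List.enumerate pairs).filter
          (fun ip => decide (t ∈ ip.2.2))).Pairwise (fun p q => p.1 < q.1) :=
        List.Pairwise.sublist List.filter_sublist (PySem.List.pairwise_lt_enumerate pairs 0)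
      exact List.Pairwise.imp (fun h => ne_of_lt h) (List.pairwise_map.mpr hfl)
    · exact List.mem_map.mpr ⟨(i, p), List.mem_filter.mpr ⟨hmem, by simpa using hm⟩, rfl⟩
  · rw [if_neg hm]
    apply List.count_eq_zero_of_not_mem
    intro hc
    rcases List.mem_map.mp hc with ⟨ip, hipf, hfst⟩
    rcases List.mem_filter.mp hipf with ⟨hipm, hpt⟩
    rcases (PySem.List.mem_enumerate_iff pairs 0 ip).mp hipm with ⟨k, hk, hip⟩
    rcases (PySem.List.mem_enumerate_iff pairs 0 (i, p)).mp hmem with ⟨k', hk', hip'⟩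
    have hi : i = (k : Int) := by
      rw [hip] at hfst; simpa using hfst.symm
    have hi' : i = (k' : Int) ∧ p = pairs[k'] := by
      constructor
      · simpa using congrArg Prod.fst hip'
      · simpa using congrArg Prod.snd hip'
    have hkk : k = k' := by
      have hcast : (k : Int) = (k' : Int) := by rw [← hi, hi'.1]
      exact_mod_cast hcast
    have hip2 : ip.2 = p := by
      subst hkk
      rw [hip]
      exact hi'.2.symm
    rw [hip2] at hpt
    exact hm (by simpa using hpt)

-- summing the indicator over the transaction's distinct items
theorem pv_sum_ite (cs : List Int) (ts : List Int) :
    ((ts.map (fun t => if t ∈ cs then (1 : Int) else 0)).sum)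
      = (((ts.filter (fun t => decide (t ∈ cs))).length : Int)) := by
  induction ts with
  | nil => simp
  | cons t ts ih =>
      by_cases hm : t ∈ cs <;> simp [List.filter_cons, hm, ih] <;> ring

-- the matched-item count reaches the candidate's distinct size iff every item of
-- the candidate occurs in the transaction
theorem pv_len_eq (transaction cs : List Int) :
    ((PySem.Set.ofList transaction).filter (fun t => decide (t ∈ cs))).length
        = (PySem.Set.ofList cs).length
      ↔ PySem.Set.issubset cs transaction = true := by
  rw [PySem.Set.issubset_iff]
  have hperm : ((PySem.Set.ofList transaction).filter (fun t => decide (t ∈ cs))).Perm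
      ((PySem.Set.ofList cs).filter (fun x => decide (x ∈ transaction))) := by
    rw [List.perm_ext_iff_of_nodup
      (List.Nodup.filter _ (PySem.Set.nodup_ofList transaction))
      (List.Nodup.filter _ (PySem.Set.nodup_ofList cs))]
    intro a
    simp only [List.mem_filter, PySem.Set.mem_ofList, decide_eq_true_eq]
    tauto
  rw [hperm.length_eq]
  constructor
  · intro hlen x hx
    have heq : (PySem.Set.ofList cs).filter (fun x => decide (x ∈ transaction))
        = PySem.Set.ofList cs := List.Sublist.eq_of_length List.filter_sublist hlen
    have hx' : x ∈ PySem.Set.ofList cs := (PySem.Set.mem_ofList cs x).mpr hx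
    rw [← heq] at hx'
    exact of_decide_eq_true (List.mem_filter.mp hx').2
  · intro hsub
    have heq : (PySem.Set.ofList cs).filter (fun x => decide (x ∈ transaction))
        = PySem.Set.ofList cs :=
      List.filter_eq_self.mpr
        (fun a ha => decide_eq_true (hsub a ((PySem.Set.mem_ofList cs a).mp ha)))
    rw [heq]

-- the matched-item counter, characterised for any enumerate position
theorem pv_have_char (pairs : List (List Int × List Int)) (transaction : List Int)
    (i : Int) (p : List Int × List Int) (hmem : (i, p) ∈ PySem.List.enumerate pairs) :
    (pvHaveB (pvIndexB pairs) transaction).getD i 0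
      = (((PySem.Set.ofList transaction).filter (fun t => decide (t ∈ p.2))).length : Int) := by
  unfold pvHaveB
  rw [pv_have_fold]
  rw [PySem.Dict.getD_empty]
  have hpt : ∀ t, ((pvIndexB pairs).getD t []) =
      ((PySem.List.enumerate pairs).filter
        (fun ip => decide (t ∈ ip.2.2))).map (fun ip => ip.1) := by
    intro t
    unfold pvIndexB
    rw [pv_index_char]
    simp
  have hmap : (PySem.Set.ofList transaction).map
        (fun t => (List.count i ((pvIndexB pairs).getD t []) : Int))
      = (PySem.Set.ofList transaction).map (fun t => if t ∈ p.2 then (1 : Int) else 0) := by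
    apply List.map_congr_left
    intro t _
    rw [hpt t, pv_count_filter_map pairs i p hmem t]
    by_cases hm : t ∈ p.2 <;> simp [hm]
  rw [hmap, pv_sum_ite]
  simp

-- B's hit condition coincides with A's subset test at every enumerate position
theorem pv_cond_char (pairs : List (List Int × List Int)) (transaction : List Int)
    (i : Int) (p : List Int × List Int) (hmem : (i, p) ∈ PySem.List.enumerate pairs) :
    ((pvHaveB (pvIndexB pairs) transaction).getD i 0 == ((PySem.Set.ofList p.2).length : Int))
      = PySem.Set.issubset p.2 transaction := by
  rw [pv_have_char pairs transaction i p hmem, Bool.eq_iff_iff, beq_iff_eq, Nat.cast_inj]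
  exact pv_len_eq transaction p.2

-- folding over enumerate with a pointwise-equal condition is folding over the list
theorem pv_fold_congr (tr : List Int) (cond : Int × (List Int × List Int) → Bool)
    (l : List (List Int × List Int)) :
    ∀ (s : Int) (st : PySem.Dict (List Int) Int × Bool),
    (∀ ip ∈ PySem.List.enumerate l s, cond ip = PySem.Set.issubset ip.2.2 tr) →
    (PySem.List.enumerate l s).foldl
        (fun st ip => if cond ip then (st.1.modify ip.2.1 0 (· + 1), true) else st) st
      = l.foldl
        (fun st p => if PySem.Set.issubset p.2 tr then (st.1.modify p.1 0 (· + 1), true) else st) st := by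
  induction l with
  | nil => intro s st _; simp [PySem.List.enumerate]
  | cons p l ih =>
      intro s st hc
      rw [PySem.List.enumerate_cons, List.foldl_cons, List.foldl_cons,
        hc (s, p) (by rw [PySem.List.enumerate_cons]; exact List.mem_cons_self)]
      exact ih (s + 1) _ (fun ip hip =>
        hc ip (by rw [PySem.List.enumerate_cons]; exact List.mem_cons_of_mem _ hip))

-- ===== VERDICT (by name: the statement is the Claim_ definition above) =====
theorem candidate_itemset_counts_spec : Claim_equal_candidate_itemset_counts := by
  intro C_k C_k_sets counter counts row transaction _dom _pre
  unfold Spec_candidate_itemset_counts candidate_itemset_counts candidate_itemset_counts_alt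
  have hst := pv_fold_congr transaction
    (fun ip => (pvHaveB (pvIndexB (C_k.zip C_k_sets)) transaction).getD ip.1 0
                  == ((PySem.Set.ofList ip.2.2).length : Int))
    (C_k.zip C_k_sets) 0 (PySem.Dict.mk counts, false)
    (fun ip hip => pv_cond_char (C_k.zip C_k_sets) transaction ip.1 ip.2 (by simpa using hip))
  exact congrArg (fun st => (st.1.items, st.2)) hst.symm
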